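-- pv_equiv track=rewrite | github.com/WalterTNFC/project-restaurant-orders | src/analyze_log.py | joao_dont_visit
-- ===== SOURCE A (Python) =====
-- def joao_dont_visit(data):
--     total_days = set()
--     days = set()
--
--     for customer, order, day in data:
--         if customer == "joao":
--             if day != "domingo":
--                 days.add(day)
--
--         if day != "domingo":
--             total_days.add(day)
--         else:
--             None
--
--     return total_days.difference(days)
-- ===== SOURCE B (Python) =====
-- def joao_dont_visit(data):
--     grouped = {}
--     for customer, order, day in data:
--         grouped.setdefault(day, set()).add(customer)
--
--     result = set()
--     for day, customers in grouped.items():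
--         if day != "domingo" and "joao" not in customers:
--             result.add(day)
--     return result
-- ===== Notes on version B (the rewrite author's own statement) =====
-- stated objective: alternative
-- what changed: Instead of maintaining two flat day-sets during one loop and subtracting them, B first builds a day->set-of-customers index over the data and then filters the grouped days for non-Sunday days that joao's customer set does not contain.
import Mathlib
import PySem

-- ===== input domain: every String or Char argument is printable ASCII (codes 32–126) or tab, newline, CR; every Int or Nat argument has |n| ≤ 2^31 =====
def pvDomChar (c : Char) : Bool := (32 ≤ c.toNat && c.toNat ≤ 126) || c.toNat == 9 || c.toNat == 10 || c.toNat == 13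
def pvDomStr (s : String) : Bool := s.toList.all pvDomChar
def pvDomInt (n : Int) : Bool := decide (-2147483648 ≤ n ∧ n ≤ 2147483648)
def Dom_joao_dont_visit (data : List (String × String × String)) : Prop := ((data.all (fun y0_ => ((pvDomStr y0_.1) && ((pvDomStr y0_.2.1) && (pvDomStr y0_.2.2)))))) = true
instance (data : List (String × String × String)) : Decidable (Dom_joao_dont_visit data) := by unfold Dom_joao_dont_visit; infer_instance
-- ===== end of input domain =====

-- B replaces A's two flat day-sets plus set-difference with a day->customers index built first and then filtered (alternative decomposition, same cost).


-- ===== PORT A =====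
-- one loop keeping the pair (total_days, days); finally total_days.difference(days)
def joao_dont_visit (data : List (String × String × String)) : List String :=
  let st : PySem.Set String × PySem.Set String :=
    data.foldl (fun st t =>
      let days := if t.1 = "joao" then
          (if t.2.2 ≠ "domingo" then PySem.Set.add st.2 t.2.2 else st.2)
        else st.2
      let total_days := if t.2.2 ≠ "domingo" then PySem.Set.add st.1 t.2.2 else st.1
      (total_days, days)) (PySem.Set.empty, PySem.Set.empty)
  PySem.Set.diff st.1 st.2

-- ===== PORT B =====
-- first pass: grouped[day] = set of customers who visited that day; second pass: filter grouped.items()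
def joao_dont_visit_alt (data : List (String × String × String)) : List String :=
  let grouped : PySem.Dict String (PySem.Set String) :=
    data.foldl (fun d t => d.modify t.2.2 PySem.Set.empty (fun s => PySem.Set.add s t.1))
      PySem.Dict.empty
  grouped.items.foldl (fun (res : PySem.Set String) p =>
    if p.1 ≠ "domingo" ∧ "joao" ∉ p.2 then PySem.Set.add res p.1 else res)
    PySem.Set.empty

-- ===== PRECONDITION & SPEC =====
def Spec_joao_dont_visit (data : List (String × String × String)) (out : List String) : Prop := out = joao_dont_visit_alt data
instance (data : List (String × String × String)) (out : List String) : Decidable (Spec_joao_dont_visit data out) := by unfold Spec_joao_dont_visit; infer_instance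

-- ===== CLAIM (what is proved, stated in full; the proofs are below) =====
def Claim_equal_joao_dont_visit : Prop := ∀ (data : List (String × String × String)), Dom_joao_dont_visit data → Spec_joao_dont_visit data (joao_dont_visit data)

-- ===== LEMMAS AND PROOFS =====

-- a conditional-add loop collects exactly the (mapped) elements passing the test, as a set
theorem condFoldAdd {β : Type} (p : β → Prop) [DecidablePred p] (f : β → String) :
    ∀ (l : List β) (s0 : PySem.Set String),
      l.foldl (fun s x => if p x then PySem.Set.add s (f x) else s) s0
        = ((l.filter (fun x => decide (p x))).map f).foldl PySem.Set.add s0 := by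
  intro l
  induction l with
  | nil => intro s0; rfl
  | cons x xs ih =>
      intro s0
      by_cases h : p x
      · simp [List.foldl, List.filter, h, ih]
      · simp [List.foldl, List.filter, h, ih]

-- set(xs) of a filtered list = filter of set(xs)
theorem ofList_filter (q : String → Bool) :
    ∀ (l : List String),
      PySem.Set.ofList (l.filter q) = (PySem.Set.ofList l).filter q := by
  intro l
  induction l using List.reverseRecOn with
  | nil => rfl
  | append_singleton xs x ih =>
      by_cases h : q x
      · rw [List.filter_append, List.filter_cons, List.filter_nil]
        simp only [h, if_pos]
        rw [PySem.Set.ofList_append_singleton, PySem.Set.ofList_append_singleton, ih,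
          PySem.Set.add_eq_ite, PySem.Set.add_eq_ite]
        by_cases hx : x ∈ PySem.Set.ofList xs
        · have hx' : x ∈ (PySem.Set.ofList xs).filter q := by
            simp [List.mem_filter, hx, h]
          simp [hx, hx']
        · have hx' : x ∉ (PySem.Set.ofList xs).filter q := by
            intro hc; exact hx (List.mem_filter.mp hc).1
          simp [hx, hx', h]
      · rw [List.filter_append, List.filter_cons, List.filter_nil]
        simp only [h, if_neg, Bool.false_eq_true, not_false_iff]
        rw [List.append_nil, PySem.Set.ofList_append_singleton, PySem.Set.add_eq_ite]
        by_cases hx : x ∈ PySem.Set.ofList xs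
        · simp [hx, ih]
        · simp [hx, ih, List.filter_append, h]

-- membership in the grouped customer set
theorem mem_group (c : String) :
    ∀ (xs : List (String × String × String)) (d : PySem.Dict String (PySem.Set String)) (day : String),
      c ∈ (xs.foldl (fun d t => d.modify t.2.2 ([] : PySem.Set String) (fun s => PySem.Set.add s t.1)) d).getD day ([] : PySem.Set String)
        ↔ c ∈ d.getD day ([] : PySem.Set String) ∨ ∃ t ∈ xs, t.2.2 = day ∧ t.1 = c := by
  intro xs
  induction xs with
  | nil => intro d day; simp
  | cons t ts ih =>
      intro d day
      rw [List.foldl_cons, ih]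
      rw [PySem.Dict.getD_modify]
      by_cases h : day = t.2.2
      · subst h
        simp [PySem.Set.mem_add]
        tauto
      · simp only [if_neg h]
        have h' : t.2.2 ≠ day := fun e => h e.symm
        simp
        tauto

-- B's second loop over pairs with pairwise-distinct, fresh first components appends the filtered keys
theorem itemsFold (pred : String × PySem.Set String → Prop) [DecidablePred pred] :
    ∀ (ps : List (String × PySem.Set String)) (res : PySem.Set String),
      (ps.map Prod.fst).Nodup → (∀ p ∈ ps, p.1 ∉ res) →
      ps.foldl (fun res p => if pred p then PySem.Set.add res p.1 else res) res
        = res ++ ((ps.filter (fun x => decide (pred x))).map Prod.fst) := by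
  intro ps
  induction ps with
  | nil => intro res _ _; simp
  | cons p ts ih =>
      intro res hnd hfresh
      rw [List.foldl_cons]
      rw [List.map_cons, List.nodup_cons] at hnd
      by_cases hp : pred p
      · have hnm : p.1 ∉ res := hfresh p (List.mem_cons_self ..)
        rw [if_pos hp, PySem.Set.add_of_not_mem hnm]
        rw [ih (res ++ [p.1]) hnd.2 ?_]
        · simp [hp]
        · intro q hq
          simp only [List.mem_append, List.mem_singleton]
          rintro (h1 | h2)
          · exact hfresh q (List.mem_cons_of_mem _ hq) h1
          · exact hnd.1 (h2 ▸ List.mem_map_of_mem hq)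
      · rw [if_neg hp, ih res hnd.2 (fun q hq => hfresh q (List.mem_cons_of_mem _ hq))]
        simp [hp]

-- ===== VERDICT (by name: the statement is the Claim_ definition above) =====
theorem joao_dont_visit_spec : Claim_equal_joao_dont_visit := by
  intro data _
  unfold Spec_joao_dont_visit joao_dont_visit joao_dont_visit_alt
  simp only []
  rw [PySem.List.foldl_prod_mk
    (fun s (t : String × String × String) => if t.2.2 ≠ "domingo" then PySem.Set.add s t.2.2 else s)
    (fun s (t : String × String × String) => if t.1 = "joao" then (if t.2.2 ≠ "domingo" then PySem.Set.add s t.2.2 else s) else s)]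
  simp only []
  rw [show (fun (s : PySem.Set String) (t : String × String × String) =>
        if t.1 = "joao" then (if t.2.2 ≠ "domingo" then PySem.Set.add s t.2.2 else s) else s)
      = (fun s t => if t.1 = "joao" ∧ t.2.2 ≠ "domingo" then PySem.Set.add s t.2.2 else s) from by
    funext s t
    by_cases h1 : t.1 = "joao" <;> by_cases h2 : t.2.2 ≠ "domingo" <;> simp [h1, h2]]
  rw [condFoldAdd (fun t : String × String × String => t.2.2 ≠ "domingo") (fun t => t.2.2)]
  rw [condFoldAdd (fun t : String × String × String => t.1 = "joao" ∧ t.2.2 ≠ "domingo") (fun t => t.2.2)]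
  have hemp : (PySem.Set.empty : PySem.Set String) = [] := rfl
  rw [hemp, ← PySem.Set.ofList_eq_foldl, ← PySem.Set.ofList_eq_foldl]
  have hmapT : List.map (fun t : String × String × String => t.2.2)
      (List.filter (fun x => decide (x.2.2 ≠ "domingo")) data)
      = List.filter (fun d => decide (d ≠ "domingo")) (List.map (fun t => t.2.2) data) := by
    rw [List.filter_map]; rfl
  rw [hmapT, ofList_filter]
  -- now RHS
  have hkeys : (List.foldl (fun d t => d.modify t.2.2 ([] : PySem.Set String) fun s => PySem.Set.add s t.1) PySem.Dict.empty data).keys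
      = PySem.Set.ofList (List.map (fun t : String × String × String => t.2.2) data) := by
    rw [PySem.Dict.keys_foldl_modify_key data (fun t : String × String × String => t.2.2)
      ([] : PySem.Set String) (fun _ t s => PySem.Set.add s t.1) PySem.Dict.empty]
    rw [PySem.Dict.keys_empty, PySem.Set.update_nil_left]
  set grouped := List.foldl (fun d t => d.modify t.2.2 ([] : PySem.Set String) fun s => PySem.Set.add s t.1) PySem.Dict.empty data with hg
  have hnodup : grouped.keys.Nodup := by rw [hkeys]; exact PySem.Set.nodup_ofList _
  have hitems : grouped.items = grouped.keys.map (fun k => (k, grouped.getD k ([] : PySem.Set String))) :=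
    PySem.Dict.items_eq_map_keys grouped hnodup _
  rw [itemsFold (fun p => p.1 ≠ "domingo" ∧ "joao" ∉ p.2) grouped.items [] ?nd (by simp)]
  case nd =>
    rw [hitems, List.map_map]
    simpa [Function.comp_def] using hnodup
  rw [List.nil_append, hitems, List.filter_map, List.map_map]
  simp only [Function.comp_def]
  rw [List.map_id']
  rw [hkeys]
  simp only [PySem.Set.diff, List.filter_filter]
  apply List.filter_congr
  intro a _
  by_cases hd : a = "domingo"
  · subst hd; simp
  · have hiff : a ∈ PySem.Set.ofList
        (List.map (fun t : String × String × String => t.2.2)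
          (List.filter (fun x => decide (x.1 = "joao" ∧ x.2.2 ≠ "domingo")) data))
        ↔ "joao" ∈ grouped.getD a [] := by
      rw [hg]
      rw [mem_group "joao" data PySem.Dict.empty a]
      simp only [PySem.Set.mem_ofList, List.mem_map, List.mem_filter, decide_eq_true_eq]
      constructor
      · rintro ⟨t, ⟨ht, hj, hnd2⟩, hta⟩
        exact Or.inr ⟨t, ht, hta, hj⟩
      · rintro (hf | ⟨t, ht, hta, hj⟩)
        · simp [PySem.Dict.getD_empty] at hf
        · exact ⟨t, ⟨ht, hj, fun e => hd (hta ▸ e ▸ rfl)⟩, hta⟩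
    simp [hd, ← hiff, Bool.and_comm]
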